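-- pv_equiv track=rewrite | github.com/Nicolas2912/paperless-receipt-automation | merchant_normalization.py | _best_substring_key
-- ===== SOURCE A (Python) =====
-- from typing import Dict, List, Optional, Tuple
--
-- def _best_substring_key(norm_text: str, keys: List[str]) -> Optional[str]:
--     """Return the best key contained as substring in norm_text.
--
--     Rules:
--     - Prefer the longest matching key.
--     - For very short keys (<3), only accept if they match at the start of
--       the normalized text (prefix match), to avoid accidental hits.
--     - For len>=3, accept anywhere as substring.
--     """
--     if not norm_text or not keys:
--         return None
--     best: Tuple[int, Optional[str]] = (0, None)
--     for k in keys: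
--         if not k:
--             continue
--         if len(k) < 3:
--             ok = norm_text.startswith(k)
--         else:
--             ok = (k in norm_text)
--         if ok:
--             ln = len(k)
--             if ln > best[0]:
--                 best = (ln, k)
--     return best[1]
-- ===== SOURCE B (Python) =====
-- def _best_substring_key(norm_text, keys):
--     """Sort keys by length descending (stable), return the first that matches:
--     prefix match for len<3 keys, substring match otherwise."""
--     if not norm_text:
--         return None
--     return next(
--         (k for k in sorted(keys, key=len, reverse=True)
--          if k and (norm_text.startswith(k) if len(k) < 3 else k in norm_text)),
--         None,
--     )
-- ===== Notes on version B (the rewrite author's own statement) =====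
-- stated objective: faster
-- what changed: Replaces A's single pass with a max-length accumulator by a stable sort of the keys by length descending followed by a first-match scan that exits at the first (longest) match, resolving ties by sort stability instead of A's strict-improvement test.
import Mathlib
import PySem

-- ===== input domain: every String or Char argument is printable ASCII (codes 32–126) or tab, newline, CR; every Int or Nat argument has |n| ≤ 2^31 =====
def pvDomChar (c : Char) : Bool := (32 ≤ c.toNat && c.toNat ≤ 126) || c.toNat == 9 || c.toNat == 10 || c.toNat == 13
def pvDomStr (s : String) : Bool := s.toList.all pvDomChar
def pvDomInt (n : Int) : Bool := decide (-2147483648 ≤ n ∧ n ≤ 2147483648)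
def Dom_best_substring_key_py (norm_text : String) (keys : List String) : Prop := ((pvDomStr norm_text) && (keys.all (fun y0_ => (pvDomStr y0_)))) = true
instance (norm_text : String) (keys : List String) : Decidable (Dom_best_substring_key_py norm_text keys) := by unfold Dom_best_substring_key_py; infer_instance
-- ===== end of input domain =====

-- B replaces A's one-pass max-length accumulator by a stable length-descending sort of the
-- keys followed by a first-match scan with early exit (alternative decomposition, same results).

-- ===== PORT A =====
-- A's loop body (literal: skip empty keys, prefix-test short keys, else substring test,
-- keep the strictly longer match)
def pvStepA (norm_text : String) (best : Int × Option String) (k : String) : Int × Option String :=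
  if k.toList = [] then best
  else
    let ok : Bool :=
      if PySem.Str.len k < 3 then PySem.Str.startswith norm_text k
      else PySem.Str.isIn k norm_text
    if ok && decide (best.1 < PySem.Str.len k) then (PySem.Str.len k, some k) else best

def best_substring_key_py (norm_text : String) (keys : List String) : Option String :=
  if norm_text.toList = [] ∨ keys = [] then none
  else (keys.foldl (pvStepA norm_text) ((0 : Int), (none : Option String))).2

-- ===== PORT B =====
-- the generator's filter: non-empty, and prefix match for len<3 / substring match otherwise
def pvMatch (norm_text k : String) : Bool :=
  decide (k.toList ≠ []) &&
    (if PySem.Str.len k < 3 then PySem.Str.startswith norm_text k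
     else PySem.Str.isIn k norm_text)

def best_substring_key_py_alt (norm_text : String) (keys : List String) : Option String :=
  if norm_text.toList = [] then none
  else (PySem.List.sorted keys (fun k => PySem.Str.len k) true).find? (pvMatch norm_text)

-- ===== PRECONDITION & SPEC =====
def Spec_best_substring_key_py (norm_text : String) (keys : List String) (out : Option String) : Prop := out = best_substring_key_py_alt norm_text keys
instance (norm_text : String) (keys : List String) (out : Option String) : Decidable (Spec_best_substring_key_py norm_text keys out) := by unfold Spec_best_substring_key_py; infer_instance

-- ===== CLAIM (what is proved, stated in full; the proofs are below) =====
def Claim_equal_best_substring_key_py : Prop := ∀ (norm_text : String) (keys : List String), Dom_best_substring_key_py norm_text keys → Spec_best_substring_key_py norm_text keys (best_substring_key_py norm_text keys)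

-- ===== LEMMAS AND PROOFS =====

-- the insertion comparator realising sorted(.., key=len, reverse=True)
def pvBef (a b : String) : Bool := decide (PySem.Str.len b < PySem.Str.len a)

lemma pvMatch_len_pos (nt k : String) (h : pvMatch nt k = true) : 1 ≤ PySem.Str.len k := by
  simp only [pvMatch, Bool.and_eq_true, decide_eq_true_eq] at h
  have h1 : 0 < k.toList.length := List.length_pos_iff.mpr h.1
  rw [PySem.Str.len_eq]
  exact_mod_cast h1

lemma pv_find_insert_neg (ok : String → Bool) (k : String) (acc : List String)
    (hk : ok k = false) :
    (PySem.List.insertBy pvBef k acc).find? ok = acc.find? ok := by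
  induction acc with
  | nil => simp [PySem.List.insertBy, hk]
  | cons y ys ih =>
    by_cases hb : pvBef k y = true
    · simp [PySem.List.insertBy, hb, hk]
    · simp only [PySem.List.insertBy, Bool.not_eq_true] at hb ⊢
      rw [if_neg (by simp [hb])]
      cases hoy : ok y with
      | true => simp [List.find?, hoy]
      | false => simpa [List.find?, hoy] using ih

lemma pv_find_insert_new (ok : String → Bool) (k : String) (acc : List String) (n : Int)
    (hk : ok k = true)
    (hbound : ∀ x ∈ acc, ok x = true → PySem.Str.len x ≤ n)
    (hlt : n < PySem.Str.len k) :
    (PySem.List.insertBy pvBef k acc).find? ok = some k := by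
  induction acc with
  | nil => simp [PySem.List.insertBy, hk]
  | cons y ys ih =>
    by_cases hb : pvBef k y = true
    · simp [PySem.List.insertBy, hb, hk]
    · have hy : ok y = false := by
        by_contra hoy
        have hoy : ok y = true := by simpa using hoy
        have := hbound y (by simp) hoy
        simp only [pvBef, decide_eq_true_eq] at hb
        omega
      simp only [PySem.List.insertBy, Bool.not_eq_true] at hb ⊢
      rw [if_neg (by simp [hb])]
      simp [List.find?, hy]
      exact ih (fun x hx => hbound x (by simp [hx]))

lemma pv_find_insert_keep (ok : String → Bool) (k m : String) (acc : List String)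
    (hpw : acc.Pairwise (fun a b => PySem.Str.len b ≤ PySem.Str.len a))
    (hfind : acc.find? ok = some m)
    (hle : PySem.Str.len k ≤ PySem.Str.len m) :
    (PySem.List.insertBy pvBef k acc).find? ok = some m := by
  induction acc with
  | nil => simp [List.find?] at hfind
  | cons y ys ih =>
    rw [List.pairwise_cons] at hpw
    cases hoy : ok y with
    | true =>
      have hym : y = m := by simpa [List.find?, hoy] using hfind
      subst hym
      have hb : pvBef k y = false := by
        simp only [pvBef, decide_eq_false_iff_not]
        omega
      simp [PySem.List.insertBy, hb, hoy]
    | false =>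
      have hfind' : ys.find? ok = some m := by simpa [List.find?, hoy] using hfind
      have hmy : PySem.Str.len m ≤ PySem.Str.len y :=
        hpw.1 m (List.mem_of_find?_eq_some hfind')
      have hb : pvBef k y = false := by
        simp only [pvBef, decide_eq_false_iff_not]
        omega
      simp only [PySem.List.insertBy, hb, Bool.false_eq_true]
      rw [if_neg (by simp)]
      simp [List.find?, hoy]
      exact ih hpw.2 hfind'

lemma pv_insert_pairwise (k : String) (acc : List String)
    (hpw : acc.Pairwise (fun a b => PySem.Str.len b ≤ PySem.Str.len a)) :
    (PySem.List.insertBy pvBef k acc).Pairwise (fun a b => PySem.Str.len b ≤ PySem.Str.len a) := by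
  induction acc with
  | nil => simp [PySem.List.insertBy]
  | cons y ys ih =>
    rw [List.pairwise_cons] at hpw
    by_cases hb : pvBef k y = true
    · have hlt : PySem.Str.len y < PySem.Str.len k := by
        simpa [pvBef] using hb
      simp only [PySem.List.insertBy]
      rw [if_pos hb, List.pairwise_cons]
      refine ⟨?_, List.pairwise_cons.mpr hpw⟩
      intro z hz
      rcases List.mem_cons.mp hz with h | h
      · subst h; omega
      · have := hpw.1 z h; omega
    · have hb' : PySem.Str.len k ≤ PySem.Str.len y := by
        have := hb; simp only [pvBef, decide_eq_true_eq] at this; omega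
      simp only [PySem.List.insertBy, Bool.not_eq_true] at hb ⊢
      rw [if_neg (by simp [hb])]
      rw [List.pairwise_cons]
      refine ⟨?_, ih hpw.2⟩
      intro z hz
      rcases (PySem.List.mem_insertBy _ _ _ _).mp hz with h | h
      · subst h; exact hb'
      · exact hpw.1 z h

lemma pv_loop (nt : String) (ks : List String) :
    ∀ (acc : List String) (n : Int) (b : Option String),
    acc.Pairwise (fun a b => PySem.Str.len b ≤ PySem.Str.len a) →
    acc.find? (pvMatch nt) = b →
    (∀ x ∈ acc, pvMatch nt x = true → PySem.Str.len x ≤ n) →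
    (b = none → n = 0) →
    (∀ m, b = some m → n = PySem.Str.len m) →
    (ks.foldl (pvStepA nt) (n, b)).2
      = (ks.foldl (fun acc x => PySem.List.insertBy pvBef x acc) acc).find? (pvMatch nt) := by
  induction ks with
  | nil =>
    intro acc n b _ hfind _ _ _
    simpa using hfind.symm
  | cons k rest ih =>
    intro acc n b hpw hfind hbound hnone hsome
    simp only [List.foldl_cons]
    by_cases hke : k.toList = []
    · have hmk : pvMatch nt k = false := by simp [pvMatch, hke]
      rw [pvStepA, if_pos hke]
      exact ih _ n b (pv_insert_pairwise k acc hpw)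
        (by rw [pv_find_insert_neg _ _ _ hmk]; exact hfind)
        (fun x hx => by
          rcases (PySem.List.mem_insertBy _ _ _ _).mp hx with h | h
          · subst h; intro h'; rw [hmk] at h'; cases h'
          · exact hbound x h)
        hnone hsome
    · have hmk : pvMatch nt k =
          (if PySem.Str.len k < 3 then PySem.Str.startswith nt k
           else PySem.Str.isIn k nt) := by simp [pvMatch, hke]
      by_cases hok : (if PySem.Str.len k < 3 then PySem.Str.startswith nt k
           else PySem.Str.isIn k nt) = true
      · have hmkt : pvMatch nt k = true := by rw [hmk]; exact hok
        by_cases hlt : n < PySem.Str.len k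
        · rw [show pvStepA nt (n, b) k = (PySem.Str.len k, some k) by
            simp only [pvStepA, if_neg hke, hok, Bool.true_and]
            exact if_pos (by simpa using hlt)]
          exact ih _ (PySem.Str.len k) (some k) (pv_insert_pairwise k acc hpw)
            (pv_find_insert_new _ _ _ n hmkt hbound hlt)
            (fun x hx hx' => by
              rcases (PySem.List.mem_insertBy _ _ _ _).mp hx with h | h
              · subst h; omega
              · have := hbound x h hx'; omega)
            (by intro h; cases h)
            (by intro m hm; cases hm; rfl)
        · rw [show pvStepA nt (n, b) k = (n, b) by
            simp only [pvStepA, if_neg hke, hok, Bool.true_and]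
            exact if_neg (by simpa using hlt)]
          -- state unchanged; b must already hold a match at least as long as k
          have hb : ∃ m, b = some m := by
            cases b with
            | none =>
              have h0 := hnone rfl
              have h1 := pvMatch_len_pos nt k hmkt
              omega
            | some m => exact ⟨m, rfl⟩
          rcases hb with ⟨m, rfl⟩
          have hnm := hsome m rfl
          exact ih _ n (some m) (pv_insert_pairwise k acc hpw)
            (pv_find_insert_keep _ _ _ _ hpw hfind (by omega))
            (fun x hx hx' => by
              rcases (PySem.List.mem_insertBy _ _ _ _).mp hx with h | h
              · subst h; omega
              · exact hbound x h hx')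
            (by intro h; cases h) hsome
      · have hmkf : pvMatch nt k = false := by rw [hmk]; simpa using hok
        rw [show pvStepA nt (n, b) k = (n, b) by
          have hokf : (if PySem.Str.len k < 3 then PySem.Str.startswith nt k
              else PySem.Str.isIn k nt) = false := by simpa using hok
          simp only [pvStepA, if_neg hke, hokf, Bool.false_and]
          rfl]
        exact ih _ n b (pv_insert_pairwise k acc hpw)
          (by rw [pv_find_insert_neg _ _ _ hmkf]; exact hfind)
          (fun x hx => by
            rcases (PySem.List.mem_insertBy _ _ _ _).mp hx with h | h
            · subst h; intro h'; rw [hmkf] at h'; cases h'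
            · exact hbound x h)
          hnone hsome

-- ===== VERDICT (by name: the statement is the Claim_ definition above) =====
theorem best_substring_key_py_spec : Claim_equal_best_substring_key_py := by
  intro norm_text keys _
  unfold Spec_best_substring_key_py best_substring_key_py best_substring_key_py_alt
  by_cases hn : norm_text.toList = []
  · simp [hn]
  · rcases keys with _ | ⟨k, ks⟩
    · simp [hn, PySem.List.sorted]
    · rw [if_neg (by simp [hn]), if_neg hn,
        PySem.List.sorted_rev_eq_foldl_insertBy (k :: ks) (fun k => PySem.Str.len k)]
      exact pv_loop norm_text (k :: ks) [] 0 none (by simp) (by simp [List.find?])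
        (by simp) (fun _ => rfl) (fun m hm => by cases hm)
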